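-- pv_equiv track=rewrite | github.com/marcstein/jcs-dashboard | trust_transfer.py | cumulative_earned_pct
-- ===== SOURCE A (Python) =====
-- from typing import Dict, List, Optional, Tuple
--
-- PHASE_ORDER = [
--     "intake", "discovery", "motions", "strategy",
--     "trial_prep", "disposition", "post_disposition"
-- ]
--
-- def cumulative_earned_pct(schedule: Dict, current_phase: str) -> int:
--     """
--     Calculate cumulative percentage earned up to and including current_phase.
--     Phases that are skipped (0%) still count as passed-through.
--     """
--     phases = schedule["phases"]
--     total = 0
--     for phase_code in PHASE_ORDER:
--         total += phases.get(phase_code, 0)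
--         if phase_code == current_phase:
--             return total
--     # Phase not found in order — return 0
--     return 0
-- ===== SOURCE B (Python) =====
-- PHASE_ORDER = [
--     "intake", "discovery", "motions", "strategy",
--     "trial_prep", "disposition", "post_disposition"
-- ]
--
-- def _rank(phase):
--     try:
--         return PHASE_ORDER.index(phase)
--     except ValueError:
--         return None
--
-- def cumulative_earned_pct(schedule, current_phase):
--     phases = schedule["phases"]
--     cutoff = _rank(current_phase)
--     if cutoff is None:
--         return 0
--     total = 0
--     for p, v in phases.items():
--         r = _rank(p)
--         if r is not None and r <= cutoff:
--             total += v
--     return total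
-- ===== Notes on version B (the rewrite author's own statement) =====
-- stated objective: alternative
-- what changed: B traverses the schedule's phases dict itself instead of PHASE_ORDER: it computes the rank (position in PHASE_ORDER) of current_phase and of each dict key, and sums the values of entries whose rank does not exceed the cutoff, so no phases.get lookups or early-return accumulation over PHASE_ORDER remain.
import Mathlib
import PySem

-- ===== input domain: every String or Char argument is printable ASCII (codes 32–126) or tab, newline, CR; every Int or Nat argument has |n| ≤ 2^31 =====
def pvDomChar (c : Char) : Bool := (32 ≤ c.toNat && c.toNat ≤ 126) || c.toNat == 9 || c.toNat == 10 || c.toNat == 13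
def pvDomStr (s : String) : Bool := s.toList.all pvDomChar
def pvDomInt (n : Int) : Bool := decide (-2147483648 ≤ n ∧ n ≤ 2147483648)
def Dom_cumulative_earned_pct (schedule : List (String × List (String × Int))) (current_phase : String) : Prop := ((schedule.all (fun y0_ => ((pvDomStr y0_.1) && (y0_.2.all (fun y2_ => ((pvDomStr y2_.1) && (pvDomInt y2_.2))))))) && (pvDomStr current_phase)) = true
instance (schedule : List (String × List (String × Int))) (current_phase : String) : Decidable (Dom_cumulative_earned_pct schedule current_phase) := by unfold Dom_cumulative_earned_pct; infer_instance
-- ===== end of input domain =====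

-- B traverses the phases dict itself, filtering entries by their rank in PHASE_ORDER,
-- instead of A's accumulating loop over PHASE_ORDER with phases.get and an early return.

def PHASE_ORDER : List String :=
  ["intake", "discovery", "motions", "strategy",
   "trial_prep", "disposition", "post_disposition"]

-- ===== PORT A =====
-- the for-loop of A: accumulate phases.get(p, 0) and return on hitting current_phase
def pctLoop (phases : List (String × Int)) (current_phase : String) :
    List String → Int → Int
  | [], _ => 0
  | p :: rest, total =>
      let t := total + (PySem.Dict.ofList phases).getD p 0
      if p == current_phase then t else pctLoop phases current_phase rest t

def cumulative_earned_pct (schedule : List (String × List (String × Int))) (current_phase : String) : Int :=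
  match (PySem.Dict.ofList schedule).get? "phases" with
  | none => 0  -- Python raises KeyError here; excluded by Pre_
  | some phases => pctLoop phases current_phase PHASE_ORDER 0

-- ===== PORT B =====
-- B's helper _rank: position in PHASE_ORDER, None if absent
def rankOf (phase : String) : Option Nat := PySem.List.index? PHASE_ORDER phase

def cumulative_earned_pct_alt (schedule : List (String × List (String × Int))) (current_phase : String) : Int :=
  match (PySem.Dict.ofList schedule).get? "phases" with
  | none => 0  -- Python raises KeyError here; excluded by Pre_
  | some phases =>
    match rankOf current_phase with
    | none => 0
    | some cutoff =>
        -- B's loop over phases.items()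
        (PySem.Dict.ofList phases).items.foldl
          (fun total kv =>
            match rankOf kv.1 with
            | none => total
            | some r => if r ≤ cutoff then total + kv.2 else total) 0

-- ===== PRECONDITION & SPEC =====
-- Pre_ excludes only schedules without a "phases" key, on which A raises KeyError.
def Pre_cumulative_earned_pct (schedule : List (String × List (String × Int))) (current_phase : String) : Prop :=
  "phases" ∈ schedule.map Prod.fst

instance (schedule : List (String × List (String × Int))) (current_phase : String) : Decidable (Pre_cumulative_earned_pct schedule current_phase) := by unfold Pre_cumulative_earned_pct; infer_instance

def pvWitness_cumulative_earned_pct : (List (String × List (String × Int))) × String :=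
  ([("phases", [("intake", 10), ("discovery", 20)])], "discovery")

def Spec_cumulative_earned_pct (schedule : List (String × List (String × Int))) (current_phase : String) (out : Int) : Prop := out = cumulative_earned_pct_alt schedule current_phase
instance (schedule : List (String × List (String × Int))) (current_phase : String) (out : Int) : Decidable (Spec_cumulative_earned_pct schedule current_phase out) := by unfold Spec_cumulative_earned_pct; infer_instance

-- ===== CLAIM (what is proved, stated in full; the proofs are below) =====
def Claim_equal_cumulative_earned_pct : Prop := ∀ (schedule : List (String × List (String × Int))) (current_phase : String), Dom_cumulative_earned_pct schedule current_phase → Pre_cumulative_earned_pct schedule current_phase → Spec_cumulative_earned_pct schedule current_phase (cumulative_earned_pct schedule current_phase)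

-- ===== LEMMAS AND PROOFS =====

-- A's loop over any order list equals a sum over the prefix up to the first hit.
theorem pctLoop_eq (phases : List (String × Int)) (cp : String) :
    ∀ (order : List String) (total : Int),
      pctLoop phases cp order total =
        match PySem.List.index? order cp with
        | none => 0
        | some idx =>
            total + ((order.take (idx + 1)).map (fun p => (PySem.Dict.ofList phases).getD p 0)).sum
  | [], total => by simp [pctLoop, PySem.List.index?]
  | p :: rest, total => by
      by_cases hp : p = cp
      · subst hp
        rw [PySem.List.index?_cons_self]
        simp [pctLoop]
      · rw [PySem.List.index?_cons_of_ne rest hp]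
        simp only [pctLoop, beq_iff_eq, if_neg hp]
        rw [pctLoop_eq phases cp rest]
        cases h : PySem.List.index? rest cp with
        | none => simp
        | some idx =>
                        simp [List.take_succ_cons, add_assoc]

-- B's foldl over the items is 'start + sum of the values whose key passes the rank filter'.
theorem foldl_rank_filter (cutoff : Nat) :
    ∀ (l : List (String × Int)) (total : Int),
      l.foldl
        (fun total kv =>
          match rankOf kv.1 with
          | none => total
          | some r => if r ≤ cutoff then total + kv.2 else total) total =
      total + ((l.filter (fun kv =>
          match rankOf kv.1 with
          | none => false
          | some r => decide (r ≤ cutoff))).map Prod.snd).sum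
  | [], total => by simp
  | kv :: rest, total => by
      simp only [List.foldl_cons, List.filter_cons]
      cases h : rankOf kv.1 with
      | none => simp [foldl_rank_filter cutoff rest total]
      | some r =>
          by_cases hr : r ≤ cutoff
          · simp [hr, foldl_rank_filter cutoff rest (total + kv.2), add_assoc]
          · simp [hr, foldl_rank_filter cutoff rest total]

-- a key passes B's rank filter iff it lies in the prefix of PHASE_ORDER that A sums
theorem rank_le_iff_mem_take (c : Nat) :
    ∀ (L : List String) (p : String),
      (∃ r, PySem.List.index? L p = some r ∧ r ≤ c) ↔ p ∈ L.take (c + 1) := by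
  intro L
  induction L generalizing c with
  | nil => intro p; simp [PySem.List.index?]
  | cons x xs ih =>
      intro p
      by_cases hp : x = p
      · subst hp
        rw [PySem.List.index?_cons_self]
        simp [List.take_succ_cons]
      · rw [PySem.List.index?_cons_of_ne xs hp]
        cases c with
        | zero =>
            constructor
            · rintro ⟨r, hr, hrc⟩
              cases h : PySem.List.index? xs p with
              | none => rw [h] at hr; simp at hr
              | some r' => rw [h] at hr; simp at hr; omega
            · intro hmem
              simp [List.take_succ_cons] at hmem
              exact absurd hmem.symm hp
        | succ c' =>
            rw [List.take_succ_cons, List.mem_cons]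
            constructor
            · rintro ⟨r, hr, hrc⟩
              cases h : PySem.List.index? xs p with
              | none => rw [h] at hr; simp at hr
              | some r' =>
                  rw [h] at hr; simp at hr
                  right
                  exact (ih c' p).mp ⟨r', h, by omega⟩
            · rintro (h | hmem)
              · exact absurd h.symm hp
              · obtain ⟨r, hr, hrc⟩ := (ih c' p).mpr hmem
                exact ⟨r + 1, by rw [hr]; rfl, by omega⟩

-- dropping terms that are 0 (keys not in the dict) from A's prefix sum
theorem sum_map_filter_of_zero (f : String → Int) (q : String → Bool) :
    ∀ (l : List String), (∀ k ∈ l, q k = false → f k = 0) →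
      (l.map f).sum = ((l.filter q).map f).sum
  | [], _ => rfl
  | k :: rest, h => by
      have hrest := sum_map_filter_of_zero f q rest (fun a ha => h a (List.mem_cons_of_mem _ ha))
      cases hq : q k with
      | false => simp [hq, h k (List.mem_cons_self) hq, hrest]
      | true => simp [hq, hrest]

-- ===== VERDICT (by name: the statement is the Claim_ definition above) =====
theorem cumulative_earned_pct_spec : Claim_equal_cumulative_earned_pct := by
  intro schedule cp _ _
  unfold Spec_cumulative_earned_pct cumulative_earned_pct cumulative_earned_pct_alt
  cases hph : (PySem.Dict.ofList schedule).get? "phases" with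
  | none => rfl
  | some phases =>
      dsimp only
      rw [pctLoop_eq]
      cases hi : rankOf cp with
      | none => unfold rankOf at hi; rw [hi]
      | some cutoff =>
          dsimp only
          unfold rankOf at hi
          rw [hi]
          dsimp only
          rw [foldl_rank_filter, zero_add, zero_add]
          set d := PySem.Dict.ofList phases with hd
          have hnd : d.keys.Nodup := PySem.Dict.nodup_keys_ofList phases
          -- rewrite B's sum as a sum over the filtered keys
          rw [PySem.Dict.items_eq_map_keys d hnd 0, List.filter_map, List.map_map]
          set P : List String := PHASE_ORDER.take (cutoff + 1) with hP
          set f : String → Int := fun k => d.getD k 0 with hf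
          -- B's filter condition equals membership in P
          have hcond : ∀ k : String,
              ((fun kv : String × Int =>
                  match rankOf kv.1 with
                  | none => false
                  | some r => decide (r ≤ cutoff)) ∘ (fun k => (k, f k))) k
                = decide (k ∈ P) := by
            intro k
            simp only [Function.comp]
            cases h : rankOf k with
            | none =>
                have : k ∉ P := by
                  intro hmem
                  obtain ⟨r, hr, _⟩ := (rank_le_iff_mem_take cutoff PHASE_ORDER k).mpr hmem
                  unfold rankOf at h; rw [h] at hr; simp at hr
                simp [this]
            | some r =>
                by_cases hr : r ≤ cutoff
                · have : k ∈ P := (rank_le_iff_mem_take cutoff PHASE_ORDER k).mp ⟨r, h, hr⟩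
                  simp [hr, this]
                · have : k ∉ P := by
                    intro hmem
                    obtain ⟨r', hr', hrc'⟩ := (rank_le_iff_mem_take cutoff PHASE_ORDER k).mpr hmem
                    unfold rankOf at h; rw [h] at hr'
                    simp at hr'; omega
                  simp [hr, this]
          rw [List.filter_congr (fun k _ => hcond k)]
          -- A's side: drop keys absent from the dict
          have hA : (P.map f).sum = ((P.filter (fun k => decide (k ∈ d.keys))).map f).sum := by
            apply sum_map_filter_of_zero
            intro k _ hk
            apply PySem.Dict.getD_of_not_contains
            rw [PySem.Dict.contains_eq_decide_mem_keys]
            simpa using hk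
          rw [hA]
          -- the two filtered key lists are permutations of each other
          have hperm : (P.filter (fun k => decide (k ∈ d.keys))).Perm
              (d.keys.filter (fun k => decide (k ∈ P))) := by
            have hPnd : P.Nodup := (List.take_sublist _ _).nodup (by decide)
            rw [List.perm_ext_iff_of_nodup (hPnd.filter _) (hnd.filter _)]
            intro a
            simp only [List.mem_filter, decide_eq_true_eq]
            tauto
          have := (hperm.map f).sum_eq
          simpa using this
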